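-- pv_equiv track=rewrite | github.com/Oka117/TAAC2026Baseline | build_fe07_p012_domain_dataset.py | _append_feature_specs
-- ===== SOURCE A (Python) =====
-- from typing import Any, DefaultDict, Dict, Iterable, List, Optional, Sequence, Tuple
--
-- def _append_feature_specs(
--     specs: Sequence[Sequence[int]],
--     adds: Sequence[Sequence[int]],
-- ) -> List[List[int]]:
--     by_fid = {int(row[0]): [int(x) for x in row] for row in specs}
--     for row in adds:
--         by_fid[int(row[0])] = [int(x) for x in row]
--     return [by_fid[fid] for fid in sorted(by_fid)]
-- ===== SOURCE B (Python) =====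
-- def _append_feature_specs(specs, adds):
--     combined = [[int(x) for x in row] for row in list(specs) + list(adds)]
--     combined.sort(key=lambda r: r[0])  # stable: equal fids keep original order
--     out = []
--     for row in combined:
--         if out and out[-1][0] == row[0]:
--             out[-1] = row  # later occurrence of the same fid wins
--         else:
--             out.append(row)
--     return out
-- ===== Notes on version B (the rewrite author's own statement) =====
-- stated objective: alternative
-- what changed: Replaces the dict-indexed merge (build a fid-keyed dict from specs, overwrite with adds, then read it back in sorted key order) by a sort-based one: concatenate the rows, stable-sort by fid, and collapse equal-fid runs in one pass keeping the last row of each run (stability makes that the last occurrence, so last-wins is preserved).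
import Mathlib
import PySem

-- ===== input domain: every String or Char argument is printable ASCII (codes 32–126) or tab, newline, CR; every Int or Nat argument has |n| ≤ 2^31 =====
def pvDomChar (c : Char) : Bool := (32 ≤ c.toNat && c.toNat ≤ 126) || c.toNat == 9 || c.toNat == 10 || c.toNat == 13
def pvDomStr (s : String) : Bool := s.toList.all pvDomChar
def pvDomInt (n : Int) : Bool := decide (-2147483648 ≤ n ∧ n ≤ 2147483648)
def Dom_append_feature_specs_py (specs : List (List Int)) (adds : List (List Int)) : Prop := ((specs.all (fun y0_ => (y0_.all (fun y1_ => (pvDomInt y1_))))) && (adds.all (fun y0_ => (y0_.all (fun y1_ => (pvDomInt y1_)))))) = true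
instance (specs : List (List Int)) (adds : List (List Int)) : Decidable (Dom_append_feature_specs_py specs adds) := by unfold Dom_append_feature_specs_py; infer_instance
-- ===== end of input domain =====

-- B replaces A's dict-indexed merge by concatenate + stable sort by fid + one collapsing pass
-- keeping the last row of each equal-fid run (alternative algorithm, same cost).

-- ===== PORT A =====
-- row[0] (both programs only evaluate it on nonempty rows; Pre_ excludes empty rows, where Python raises IndexError)
def pvFid (row : List Int) : Int := (PySem.List.pyGet? row 0).getD 0

def append_feature_specs_py (specs : List (List Int)) (adds : List (List Int)) : List (List Int) :=
  -- by_fid = {int(row[0]): [int(x) for x in row] for row in specs}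
  let init : PySem.Dict Int (List Int) :=
    specs.foldl (fun d row => d.insert (pvFid row) (row.map (fun x => x))) PySem.Dict.empty
  -- for row in adds: by_fid[int(row[0])] = [int(x) for x in row]
  let byFid : PySem.Dict Int (List Int) :=
    adds.foldl (fun d row => d.insert (pvFid row) (row.map (fun x => x))) init
  -- [by_fid[fid] for fid in sorted(by_fid)]   (lookup always hits: fid ranges over the keys)
  (PySem.List.sorted byFid.keys (fun k => k)).map (fun fid => (byFid.get? fid).getD [])

-- ===== PORT B =====
-- loop body: if out and out[-1][0] == row[0]: out[-1] = row else: out.append(row)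
def pvStep (out : List (List Int)) (row : List Int) : List (List Int) :=
  if out ≠ [] ∧ pvFid ((PySem.List.pyGet? out (-1)).getD []) = pvFid row
  then out.dropLast ++ [row] else out ++ [row]

def append_feature_specs_py_alt (specs : List (List Int)) (adds : List (List Int)) : List (List Int) :=
  -- combined = [[int(x) for x in row] for row in list(specs) + list(adds)]
  let combined : List (List Int) := (specs ++ adds).map (fun row => row.map (fun x => x))
  -- combined.sort(key=lambda r: r[0])   (stable)
  let sortedC : List (List Int) := PySem.List.sorted combined pvFid
  -- collapsing pass
  sortedC.foldl pvStep []

-- ===== PRECONDITION & SPEC =====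
-- Pre_ excludes exactly the inputs containing an empty row: there Python A raises IndexError on
-- row[0] (and Python B raises the same way in its sort key), so neither returns.
def Pre_append_feature_specs_py (specs : List (List Int)) (adds : List (List Int)) : Prop :=
  (∀ r ∈ specs, r ≠ []) ∧ (∀ r ∈ adds, r ≠ [])
instance (specs : List (List Int)) (adds : List (List Int)) : Decidable (Pre_append_feature_specs_py specs adds) := by unfold Pre_append_feature_specs_py; infer_instance

def pvWitness_append_feature_specs_py : List (List Int) × List (List Int) :=
  ([[1, 2], [2, 3], [1, 4]], [[2, 9], [5, 0]])

def Spec_append_feature_specs_py (specs : List (List Int)) (adds : List (List Int)) (out : List (List Int)) : Prop := out = append_feature_specs_py_alt specs adds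
instance (specs : List (List Int)) (adds : List (List Int)) (out : List (List Int)) : Decidable (Spec_append_feature_specs_py specs adds out) := by unfold Spec_append_feature_specs_py; infer_instance

-- ===== CLAIM (what is proved, stated in full; the proofs are below) =====
def Claim_equal_append_feature_specs_py : Prop := ∀ (specs : List (List Int)) (adds : List (List Int)), Dom_append_feature_specs_py specs adds → Pre_append_feature_specs_py specs adds → Spec_append_feature_specs_py specs adds (append_feature_specs_py specs adds)

-- ===== LEMMAS AND PROOFS =====

-- the last row of l whose fid is k (default []), the common normal form of both programs
def pvLast (l : List (List Int)) (k : Int) : List Int :=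
  ((l.filter (fun r => pvFid r == k)).getLast?).getD []

-- collapse maximal runs of equal fid to their last element (for fid-sorted lists)
def pvGL : List (List Int) → List (List Int)
  | [] => []
  | [a] => [a]
  | a :: b :: t => if pvFid a = pvFid b then pvGL (b :: t) else a :: pvGL (b :: t)

theorem pv_lastGetD (a x : List Int) (u : List (List Int)) :
    ((a :: u).getLast?).getD x = (u.getLast?).getD a := by
  induction u generalizing a x with
  | nil => rfl
  | cons b v ih => rw [List.getLast?_cons_cons, ih b x, ih b a]

-- A's dict fold looked up at k is the last matching row
theorem pv_dict_fold (l : List (List Int)) (d : PySem.Dict Int (List Int)) (k : Int) :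
    (l.foldl (fun d row => d.insert (pvFid row) (row.map (fun x => x))) d).getD k []
      = ((l.filter (fun r => pvFid r == k)).getLast?).getD (d.getD k []) := by
  induction l generalizing d with
  | nil => rfl
  | cons r t ih =>
    rw [List.foldl_cons, ih, PySem.Dict.getD_insert]
    by_cases h : k = pvFid r
    · rw [if_pos h]
      have hb : (pvFid r == k) = true := by simp [h]
      simp only [List.filter_cons, hb, if_true]
      rw [pv_lastGetD]
      simp
    · rw [if_neg h]
      have hb : (pvFid r == k) = false := by
        simp only [beq_eq_false_iff_ne, ne_eq]
        exact fun hh => h hh.symm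
      simp [hb]

theorem pv_pyGet_concat (acc : List (List Int)) (a : List Int) :
    PySem.List.pyGet? (acc ++ [a]) (-1) = some a := by
  have hidx : PySem.List.pyIdx? (acc.length + 1) (-1) = some acc.length := by
    simp only [PySem.List.pyIdx?]
    rw [if_neg (by omega), if_pos (by push_cast; omega)]
    norm_num
  simp [PySem.List.pyGet?, hidx]

theorem pv_step_eq (acc : List (List Int)) (a r : List Int) (h : pvFid a = pvFid r) :
    pvStep (acc ++ [a]) r = acc ++ [r] := by
  unfold pvStep
  have hc : acc ++ [a] ≠ [] ∧
      pvFid ((PySem.List.pyGet? (acc ++ [a]) (-1)).getD []) = pvFid r :=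
    ⟨by simp, by simp [h]⟩
  rw [if_pos hc, List.dropLast_concat]

theorem pv_step_ne (acc : List (List Int)) (a r : List Int) (h : pvFid a ≠ pvFid r) :
    pvStep (acc ++ [a]) r = (acc ++ [a]) ++ [r] := by
  unfold pvStep
  have hc : ¬ (acc ++ [a] ≠ [] ∧
      pvFid ((PySem.List.pyGet? (acc ++ [a]) (-1)).getD []) = pvFid r) := by
    rintro ⟨-, hc⟩
    rw [pv_pyGet_concat] at hc
    simp only [Option.getD_some] at hc
    exact h hc
  rw [if_neg hc]

theorem pv_scan_inv (t : List (List Int)) :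
    ∀ (acc : List (List Int)) (a : List Int),
      t.Pairwise (fun x y => pvFid x ≤ pvFid y) → (∀ r ∈ t, pvFid a ≤ pvFid r) →
      t.foldl pvStep (acc ++ [a]) = acc ++ pvGL (a :: t) := by
  induction t with
  | nil => intro acc a _ _; simp [pvGL]
  | cons r t' ih =>
    intro acc a hpw hle
    rw [List.pairwise_cons] at hpw
    by_cases h : pvFid a = pvFid r
    · rw [List.foldl_cons, pv_step_eq acc a r h, ih acc r hpw.2 hpw.1]
      simp [pvGL, h]
    · rw [List.foldl_cons, pv_step_ne acc a r h, ih (acc ++ [a]) r hpw.2 hpw.1]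
      simp [pvGL, h, List.append_assoc]

theorem pv_scan_eq_pvGL (ys : List (List Int))
    (h : ys.Pairwise (fun x y => pvFid x ≤ pvFid y)) :
    ys.foldl pvStep [] = pvGL ys := by
  cases ys with
  | nil => rfl
  | cons a t =>
    rw [List.pairwise_cons] at h
    have h0 : pvStep [] a = [] ++ [a] := by
      unfold pvStep
      rw [if_neg (fun hc => hc.1 rfl)]
    rw [List.foldl_cons, h0, pv_scan_inv t [] a h.2 h.1]
    simp

-- inserting x into a fid-sorted list puts it after all equal-fid elements
theorem pv_filter_insertBy (x : List Int) (ys : List (List Int)) (k : Int)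
    (h : ys.Pairwise (fun a b => pvFid a ≤ pvFid b)) :
    (PySem.List.insertBy (fun a b => decide (pvFid a < pvFid b)) x ys).filter
        (fun r => pvFid r == k)
      = ys.filter (fun r => pvFid r == k) ++ (if pvFid x == k then [x] else []) := by
  induction ys with
  | nil =>
    by_cases hx : (pvFid x == k) = true <;>
      simp [PySem.List.insertBy, hx]
  | cons y ys' ih =>
    rw [List.pairwise_cons] at h
    by_cases hlt : pvFid x < pvFid y
    · rw [show PySem.List.insertBy (fun a b => decide (pvFid a < pvFid b)) x (y :: ys')
            = x :: y :: ys' by simp [PySem.List.insertBy, hlt]]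
      by_cases hxk : (pvFid x == k) = true
      · have hknil : (y :: ys').filter (fun r => pvFid r == k) = [] := by
          rw [List.filter_eq_nil_iff]
          intro r hr
          rw [List.mem_cons] at hr
          have hyr : pvFid y ≤ pvFid r := by
            rcases hr with rfl | hr
            · exact le_refl _
            · exact h.1 r hr
          have hxkeq : pvFid x = k := by simpa using hxk
          simp only [beq_iff_eq]
          omega
        simp [hxk, hknil]
      · simp [List.filter_cons, hxk]
    · rw [show PySem.List.insertBy (fun a b => decide (pvFid a < pvFid b)) x (y :: ys')
            = y :: PySem.List.insertBy (fun a b => decide (pvFid a < pvFid b)) x ys' by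
          simp [PySem.List.insertBy, hlt]]
      simp only [List.filter_cons]
      rw [ih h.2]
      by_cases hyk : (pvFid y == k) = true <;> simp [hyk]

-- stability of Python's sort: the subsequence of fid-k rows is unchanged
theorem pv_sorted_filter (xs : List (List Int)) (k : Int) :
    (PySem.List.sorted xs pvFid).filter (fun r => pvFid r == k)
      = xs.filter (fun r => pvFid r == k) := by
  induction xs using List.reverseRecOn with
  | nil => rw [PySem.List.sorted_eq_foldl_insertBy]; rfl
  | append_singleton l x ih =>
    rw [PySem.List.sorted_eq_foldl_insertBy, List.foldl_append, List.foldl_cons, List.foldl_nil,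
      ← PySem.List.sorted_eq_foldl_insertBy]
    rw [pv_filter_insertBy x _ k (PySem.List.sorted_pairwise l pvFid), ih,
      List.filter_append]
    congr 1
    by_cases hx : (pvFid x == k) = true <;> simp [hx]

-- the collapsing pass over a fid-sorted list yields, for each distinct fid in
-- strictly increasing order, the last row with that fid
theorem pv_pvGL_eq (ys : List (List Int)) :
    ∀ (ks : List Int), ys.Pairwise (fun x y => pvFid x ≤ pvFid y) →
      ks.Pairwise (· < ·) → (∀ k, k ∈ ks ↔ k ∈ ys.map pvFid) →
      pvGL ys = ks.map (fun k => pvLast ys k) := by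
  induction ys with
  | nil =>
    intro ks _ _ hmem
    cases ks with
    | nil => rfl
    | cons k ks' =>
      have := (hmem k).1 (by simp)
      simp at this
  | cons a t ih =>
    intro ks hpw hks hmem
    cases t with
    | nil =>
      have hks1 : ks = [pvFid a] := by
        cases ks with
        | nil =>
          have := (hmem (pvFid a)).2 (by simp)
          simp at this
        | cons k ks' =>
          have hk : k = pvFid a := by
            have := (hmem k).1 (by simp)
            simpa using this
          have hnil : ks' = [] := by
            cases ks' with
            | nil => rfl
            | cons k' ks'' =>
              have hk' : k' = pvFid a := by
                have := (hmem k').1 (by simp)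
                simpa using this
              rw [List.pairwise_cons] at hks
              have := hks.1 k' (by simp)
              omega
          rw [hk, hnil]
      rw [hks1]
      simp [pvGL, pvLast, List.filter_cons]
    | cons b t' =>
      rw [List.pairwise_cons] at hpw
      have hab : pvFid a ≤ pvFid b := hpw.1 b (by simp)
      have hpw' : (b :: t').Pairwise (fun x y => pvFid x ≤ pvFid y) := hpw.2
      by_cases h : pvFid a = pvFid b
      · -- head's fid repeats: it contributes nothing
        have hmem' : ∀ k, k ∈ ks ↔ k ∈ (b :: t').map pvFid := by
          intro k
          rw [hmem k]
          simp only [List.map_cons, List.mem_cons]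
          constructor
          · rintro (hk | hk)
            · left; omega
            · exact hk
          · rintro hk; right; exact hk
        have hgl : pvGL (a :: b :: t') = pvGL (b :: t') := by simp [pvGL, h]
        rw [hgl, ih ks hpw' hks hmem']
        apply List.map_congr_left
        intro k hk
        unfold pvLast
        by_cases hak : pvFid a = k
        · have hb : (pvFid a == k) = true := by simp [hak]
          have hbmem : b ∈ (b :: t').filter (fun r => pvFid r == k) := by
            rw [List.mem_filter]
            refine ⟨by simp, ?_⟩
            simp only [beq_iff_eq]
            omega
          conv_rhs => rw [List.filter_cons]
          rw [if_pos hb, pv_lastGetD]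
          cases hu : ((b :: t').filter (fun r => pvFid r == k)).getLast? with
          | none =>
            rw [List.getLast?_eq_none_iff] at hu
            rw [hu] at hbmem
            simp at hbmem
          | some v => rfl
        · have hb : ¬ ((pvFid a == k) = true) := by simp [hak]
          conv_rhs => rw [List.filter_cons]
          rw [if_neg hb]
      · -- head's fid is strictly minimal and unique
        have hlt : ∀ k ∈ (b :: t').map pvFid, pvFid a < k := by
          intro k hk
          simp only [List.map_cons, List.mem_cons, List.mem_map] at hk
          rcases hk with hk | ⟨r, hr, hrk⟩
          · omega
          · have h1 : pvFid b ≤ pvFid r := by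
              rw [List.pairwise_cons] at hpw'
              exact hpw'.1 r hr
            omega
        cases ks with
        | nil =>
          have := (hmem (pvFid a)).2 (by simp)
          simp at this
        | cons k0 ks' =>
          rw [List.pairwise_cons] at hks
          have hk0 : k0 = pvFid a := by
            by_contra hne
            have h1 : k0 ∈ (a :: b :: t').map pvFid := (hmem k0).1 (by simp)
            simp only [List.map_cons, List.mem_cons] at h1
            have h2 : pvFid a < k0 := by
              rcases h1 with h1 | h1
              · exact absurd h1 hne
              · exact hlt k0 (by simp only [List.map_cons, List.mem_cons]; exact h1)
            have h3 : pvFid a ∈ k0 :: ks' := (hmem (pvFid a)).2 (by simp)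
            rw [List.mem_cons] at h3
            rcases h3 with h3 | h3
            · omega
            · have := hks.1 _ h3; omega
          have hmem' : ∀ k, k ∈ ks' ↔ k ∈ (b :: t').map pvFid := by
            intro k
            constructor
            · intro hk
              have h1 : pvFid a < k := by have := hks.1 k hk; omega
              have h2 := (hmem k).1 (List.mem_cons_of_mem _ hk)
              simp only [List.map_cons, List.mem_cons] at h2 ⊢
              rcases h2 with h2 | h2
              · omega
              · exact h2
            · intro hk
              have h1 : pvFid a < k := hlt k hk
              have h2 : k ∈ k0 :: ks' := (hmem k).2 (by
                simp only [List.map_cons, List.mem_cons] at hk ⊢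
                right; exact hk)
              rw [List.mem_cons] at h2
              rcases h2 with h2 | h2
              · omega
              · exact h2
          have hgl : pvGL (a :: b :: t') = a :: pvGL (b :: t') := by simp [pvGL, h]
          rw [hgl, ih ks' hpw' hks.2 hmem', hk0, List.map_cons]
          congr 1
          · -- head: the only fid-a row is a itself
            unfold pvLast
            have hnil : (b :: t').filter (fun r => pvFid r == pvFid a) = [] := by
              rw [List.filter_eq_nil_iff]
              intro r hr
              have := hlt (pvFid r) (List.mem_map_of_mem hr)
              simp only [beq_iff_eq]
              omega
            rw [List.filter_cons, if_pos (by simp), hnil]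
            rfl
          · -- tail: a matches none of the remaining fids
            apply List.map_congr_left
            intro k hk
            have h1 : pvFid a < k := by have := hks.1 k hk; omega
            unfold pvLast
            conv_rhs => rw [List.filter_cons]
            rw [if_neg (by simp only [beq_iff_eq]; omega)]

-- A computes the normal form
theorem pv_A_eq (specs adds : List (List Int)) :
    append_feature_specs_py specs adds
      = (PySem.List.sorted (PySem.Set.ofList ((specs ++ adds).map pvFid)) (fun k => k)).map
          (fun k => pvLast (specs ++ adds) k) := by
  simp only [append_feature_specs_py]
  rw [← List.foldl_append]
  have hkeys : ((specs ++ adds).foldl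
        (fun d row => d.insert (pvFid row) (row.map (fun x => x)))
        (PySem.Dict.empty : PySem.Dict Int (List Int))).keys
      = PySem.Set.ofList ((specs ++ adds).map pvFid) := by
    rw [PySem.Dict.keys_foldl_insert_key]
    rfl
  rw [hkeys]
  apply List.map_congr_left
  intro k _
  show ((specs ++ adds).foldl (fun d row => d.insert (pvFid row) (row.map (fun x => x)))
      PySem.Dict.empty).getD k [] = _
  rw [pv_dict_fold, PySem.Dict.getD_empty]
  rfl

-- B computes the normal form
theorem pv_B_eq (specs adds : List (List Int)) :
    append_feature_specs_py_alt specs adds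
      = (PySem.List.sorted (PySem.Set.ofList ((specs ++ adds).map pvFid)) (fun k => k)).map
          (fun k => pvLast (specs ++ adds) k) := by
  simp only [append_feature_specs_py_alt]
  have hc : (specs ++ adds).map (fun row => row.map (fun x => x)) = specs ++ adds := by
    simp
  rw [hc]
  have hpw := PySem.List.sorted_pairwise (specs ++ adds) pvFid
  rw [pv_scan_eq_pvGL _ hpw]
  have hmem : ∀ k, k ∈ PySem.List.sorted (PySem.Set.ofList ((specs ++ adds).map pvFid))
      (fun k => k) ↔ k ∈ (PySem.List.sorted (specs ++ adds) pvFid).map pvFid := by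
    intro k
    rw [PySem.List.mem_sorted, PySem.Set.mem_ofList]
    exact (((PySem.List.sorted_perm (specs ++ adds) pvFid false).map pvFid).mem_iff).symm
  rw [pv_pvGL_eq _ _ hpw (PySem.List.sorted_ofList_pairwise_lt _) hmem]
  apply List.map_congr_left
  intro k _
  unfold pvLast
  rw [pv_sorted_filter]

-- ===== VERDICT (by name: the statement is the Claim_ definition above) =====
theorem append_feature_specs_py_spec : Claim_equal_append_feature_specs_py := by
  intro specs adds _ _
  unfold Spec_append_feature_specs_py
  rw [pv_A_eq, pv_B_eq]
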